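-- pv_equiv track=rewrite | github.com/mabagheri/PythonPractice | DailyCodingProblems/MixedProblems.py | path_Staircase_me
-- ===== SOURCE A (Python) =====
-- def path_Staircase_me(N, X):
--     stack = [[0]]
--
--     while stack:
--         path = stack.pop()
--
--         for _next in X:
--             if _next + sum(path) == N:
--                 yield path + [_next]
--             elif _next + sum(path) < N:
--                 stack.append((path + [_next]))
-- ===== SOURCE B (Python) =====
-- def path_Staircase_me(N, X):
--     # Recursive generator on the remaining amount instead of an explicit stack.
--     # Direct completions are yielded first (in X order); subtrees of smaller
--     # partial paths follow in reversed(X) order, matching the LIFO exploration.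
--     def helper(remaining):
--         for x in X:
--             if x == remaining:
--                 yield [x]
--         for x in reversed(X):
--             if x < remaining:
--                 for rest in helper(remaining - x):
--                     yield [x] + rest
--
--     for comp in helper(N):
--         yield [0] + comp
-- ===== Notes on version B (the rewrite author's own statement) =====
-- stated objective: alternative
-- what changed: Replaces A's explicit-stack worklist loop with a recursive generator on the remaining amount (direct completions yielded in X order, then subtrees explored over reversed(X), reproducing the LIFO yield order).
import Mathlib
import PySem

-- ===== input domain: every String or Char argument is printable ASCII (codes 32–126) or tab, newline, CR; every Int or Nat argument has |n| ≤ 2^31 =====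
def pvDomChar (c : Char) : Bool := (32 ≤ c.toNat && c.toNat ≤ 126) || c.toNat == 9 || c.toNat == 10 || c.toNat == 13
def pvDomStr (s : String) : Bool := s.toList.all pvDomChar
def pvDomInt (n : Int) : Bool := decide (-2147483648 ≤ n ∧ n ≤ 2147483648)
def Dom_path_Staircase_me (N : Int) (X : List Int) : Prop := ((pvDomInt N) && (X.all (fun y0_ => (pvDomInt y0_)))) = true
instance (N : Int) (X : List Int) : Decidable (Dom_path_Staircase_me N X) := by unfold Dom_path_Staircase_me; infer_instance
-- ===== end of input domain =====

-- B replaces A's explicit stack-driven loop by a recursive generator on the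
-- remaining amount (objective: alternative decomposition, same yielded sequence).

-- ===== PORT A =====
-- sum(path)
def pySum (p : List Int) : Int := p.foldl (· + ·) 0

-- the while-loop of A; the stack is kept top-first (Python's stack reversed:
-- pop() = head, append = cons); fuel is a termination guard only.
def aLoop (N : Int) (X : List Int) : Nat → List (List Int) → List (List Int)
  | _, [] => []
  | 0, _ :: _ => []
  | f + 1, path :: rest =>
    let r := X.foldl (fun (acc : List (List Int) × List (List Int)) x =>
      if x + pySum path = N then (acc.1 ++ [path ++ [x]], acc.2)
      else if x + pySum path < N then (acc.1, (path ++ [x]) :: acc.2)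
      else acc) (([], rest))
    r.1 ++ aLoop N X f r.2

def path_Staircase_me (N : Int) (X : List Int) : List (List Int) :=
  aLoop N X ((X.length + 1) ^ (N.toNat + 1)) [[0]]

-- ===== PORT B =====
-- helper(remaining) of B; fuel is a termination guard only (depth ≤ N under Pre_).
def helperB (X : List Int) : Nat → Int → List (List Int)
  | 0, _ => []
  | f + 1, r =>
    (X.flatMap fun x => if x = r then [[x]] else [])
    ++ X.reverse.flatMap fun x =>
        if x < r then (helperB X f (r - x)).map (fun rest => x :: rest) else []

def path_Staircase_me_alt (N : Int) (X : List Int) : List (List Int) :=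
  (helperB X (N.toNat + 1) N).map (fun comp => [0] ++ comp)

-- ===== PRECONDITION & SPEC =====
-- Pre_ excludes exactly the inputs on which A never returns from iteration
-- (list(A(N, X)) hangs): that happens iff some step is ≤ 0 while some step is < N.
def Pre_path_Staircase_me (N : Int) (X : List Int) : Prop :=
  (∀ x ∈ X, 1 ≤ x) ∨ (∀ x ∈ X, N ≤ x)
instance (N : Int) (X : List Int) : Decidable (Pre_path_Staircase_me N X) := by
  unfold Pre_path_Staircase_me; infer_instance

def pvWitness_path_Staircase_me : Int × List Int := (4, [1, 2])

def Spec_path_Staircase_me (N : Int) (X : List Int) (out : List (List Int)) : Prop := out = path_Staircase_me_alt N X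
instance (N : Int) (X : List Int) (out : List (List Int)) : Decidable (Spec_path_Staircase_me N X out) := by unfold Spec_path_Staircase_me; infer_instance

-- ===== CLAIM (what is proved, stated in full; the proofs are below) =====
def Claim_equal_path_Staircase_me : Prop := ∀ (N : Int) (X : List Int), Dom_path_Staircase_me N X → Pre_path_Staircase_me N X → Spec_path_Staircase_me N X (path_Staircase_me N X)

-- ===== LEMMAS AND PROOFS =====

-- generic: flatMap over a filter = flatMap with an if
theorem flatMap_filter_if {α β : Type} (c : α → Bool) (g : α → List β) :
    ∀ l : List α, (l.filter c).flatMap g = l.flatMap (fun x => if c x then g x else []) := by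
  intro l
  induction l with
  | nil => rfl
  | cons x xs ih =>
    by_cases h : c x <;> simp [h, ih]

theorem pySum_append (p : List Int) (x : Int) : pySum (p ++ [x]) = pySum p + x := by
  simp [pySum]

-- characterisation of A's inner for-loop
theorem foldA_spec (N : Int) (p : List Int) :
    ∀ (X : List Int) (a b : List (List Int)),
      X.foldl (fun (acc : List (List Int) × List (List Int)) x =>
        if x + pySum p = N then (acc.1 ++ [p ++ [x]], acc.2)
        else if x + pySum p < N then (acc.1, (p ++ [x]) :: acc.2)
        else acc) (a, b)
      = (a ++ X.flatMap (fun x => if x + pySum p = N then [p ++ [x]] else []),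
         (((X.filter (fun x => decide (x + pySum p < N))).map (fun x => p ++ [x])).reverse) ++ b) := by
  intro X
  induction X with
  | nil => intro a b; simp
  | cons x xs ih =>
    intro a b
    by_cases h1 : x + pySum p = N
    · have h2 : ¬ (x + pySum p < N) := by omega
      simp [List.foldl_cons, h1, ih]
    · by_cases h2 : x + pySum p < N
      · simp [List.foldl_cons, h1, h2, ih]
      · simp [List.foldl_cons, h1, h2, ih]

-- helperB is fuel-independent once the fuel exceeds the remaining amount
theorem helperB_stab (X : List Int) (hb : ∀ x ∈ X, 1 ≤ x) :
    ∀ (f g : Nat) (r : Int), r.toNat < f → r.toNat < g → helperB X f r = helperB X g r := by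
  intro f
  induction f with
  | zero => intro g r hf; omega
  | succ f ih =>
    intro g r hf hg
    obtain ⟨g', rfl⟩ : ∃ g', g = g' + 1 := ⟨g - 1, by omega⟩
    simp only [helperB]
    congr 1
    apply List.flatMap_congr
    intro x hx
    have hx1 : 1 ≤ x := hb x (List.mem_reverse.mp hx)
    by_cases hlt : x < r
    · have h1 : (r - x).toNat < f := by omega
      have h2 : (r - x).toNat < g' := by omega
      simp [hlt, ih g' (r - x) h1 h2]
    · simp [hlt]

-- the potential of a stack (iteration-count bound)
def phi (N : Int) (X : List Int) (st : List (List Int)) : Nat :=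
  (st.map (fun p => (X.length + 1) ^ (N - pySum p).toNat)).sum

-- main invariant: with enough fuel, the stack loop produces, for each stack
-- entry in order, the full subtree output described by B's helper
theorem aLoop_eq (N : Int) (X : List Int) (hb : ∀ x ∈ X, 1 ≤ x) :
    ∀ (f : Nat) (st : List (List Int)), phi N X st ≤ f →
      aLoop N X f st = st.flatMap (fun p =>
        (helperB X ((N - pySum p).toNat + 1) (N - pySum p)).map (fun t => p ++ t)) := by
  intro f
  induction f with
  | zero =>
    intro st hst
    cases st with
    | nil => rfl
    | cons p rest =>
      exfalso
      have h1 : 0 < (X.length + 1) ^ (N - pySum p).toNat := pow_pos (by omega) _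
      have h2 : phi N X (p :: rest) = (X.length + 1) ^ (N - pySum p).toNat + phi N X rest := by
        simp [phi]
      omega
  | succ f ih =>
    intro st hst
    cases st with
    | nil => rfl
    | cons p rest =>
      simp only [aLoop]
      rw [foldA_spec N p X [] rest]
      simp only [List.nil_append]
      -- potential bookkeeping
      have hphiP : phi N X ((X.filter (fun x => decide (x + pySum p < N))).map (fun x => p ++ [x])) + 1
          ≤ (X.length + 1) ^ (N - pySum p).toNat := by
        by_cases hfe : X.filter (fun x => decide (x + pySum p < N)) = []
        · have h1 : 0 < (X.length + 1) ^ (N - pySum p).toNat := pow_pos (by omega) _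
          have h2 : phi N X ((X.filter (fun x => decide (x + pySum p < N))).map (fun x => p ++ [x])) = 0 := by
            simp [phi, hfe]
          omega
        · obtain ⟨x0, hx0mem⟩ := List.exists_mem_of_ne_nil _ hfe
          have hx0X : x0 ∈ X := (List.mem_filter.mp hx0mem).1
          have hx0lt : x0 + pySum p < N := by
            have := (List.mem_filter.mp hx0mem).2; simpa using this
          have hx01 : 1 ≤ x0 := hb x0 hx0X
          have he2 : 2 ≤ (N - pySum p).toNat := by omega
          set e := (N - pySum p).toNat with he
          set P : List (List Int) := (X.filter (fun x => decide (x + pySum p < N))).map (fun x => p ++ [x]) with hP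
          have hbound : ∀ q ∈ P.map (fun q => (X.length + 1) ^ (N - pySum q).toNat),
              q ≤ (X.length + 1) ^ (e - 1) := by
            intro q hq
            rcases List.mem_map.mp hq with ⟨q', hq', rfl⟩
            rcases List.mem_map.mp hq' with ⟨x, hx, rfl⟩
            have hxX := (List.mem_filter.mp hx).1
            have hxlt : x + pySum p < N := by
              have := (List.mem_filter.mp hx).2; simpa using this
            have hx1 : 1 ≤ x := hb x hxX
            have hle : (N - pySum (p ++ [x])).toNat ≤ e - 1 := by
              rw [pySum_append]; omega
            exact Nat.pow_le_pow_right (by omega) hle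
          have hsum := List.sum_le_card_nsmul _ _ hbound
          have hlen : P.length ≤ X.length := by
            rw [hP, List.length_map]; exact List.length_filter_le _ _
          have h1 : 0 < (X.length + 1) ^ (e - 1) := pow_pos (by omega) _
          have hpow : (X.length + 1) ^ e = (X.length + 1) ^ (e - 1) * (X.length + 1) := by
            rw [← pow_succ]; congr 1; omega
          have hmul : P.length * (X.length + 1) ^ (e - 1) ≤ X.length * (X.length + 1) ^ (e - 1) :=
            Nat.mul_le_mul_right _ hlen
          simp only [smul_eq_mul, List.length_map] at hsum
          have hphiPdef : phi N X P = (P.map (fun q => (X.length + 1) ^ (N - pySum q).toNat)).sum := rfl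
          rw [hphiPdef]
          calc (P.map (fun q => (X.length + 1) ^ (N - pySum q).toNat)).sum + 1
              ≤ P.length * (X.length + 1) ^ (e - 1) + 1 := by omega
            _ ≤ X.length * (X.length + 1) ^ (e - 1) + (X.length + 1) ^ (e - 1) := by omega
            _ = (X.length + 1) ^ e := by rw [hpow]; ring
      have hphi' : phi N X (((X.filter (fun x => decide (x + pySum p < N))).map (fun x => p ++ [x])).reverse ++ rest) ≤ f := by
        have h1 : phi N X (((X.filter (fun x => decide (x + pySum p < N))).map (fun x => p ++ [x])).reverse ++ rest)
            = phi N X ((X.filter (fun x => decide (x + pySum p < N))).map (fun x => p ++ [x])) + phi N X rest := by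
          simp [phi, List.sum_reverse]
        have h2 : phi N X (p :: rest) = (X.length + 1) ^ (N - pySum p).toNat + phi N X rest := by
          simp [phi]
        rw [h2] at hst
        omega
      rw [ih _ hphi']
      rw [List.flatMap_append, List.flatMap_cons]
      rw [← List.append_assoc]
      congr 1
      -- one node's output: direct yields then reversed-children subtrees
      conv_rhs => rw [helperB]
      rw [List.map_append]
      congr 1
      · -- the direct yields
        rw [List.map_flatMap]
        apply List.flatMap_congr
        intro x hx
        by_cases h1 : x + pySum p = N
        · have h2 : x = N - pySum p := by omega
          simp [h2]
        · have h2 : ¬ (x = N - pySum p) := by omega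
          simp [h1, h2]
      · -- the subtrees, in reversed X order
        rw [← List.map_reverse, ← List.filter_reverse, List.flatMap_map, List.map_flatMap]
        rw [flatMap_filter_if]
        apply List.flatMap_congr
        intro x hx
        have hxX : x ∈ X := List.mem_reverse.mp hx
        have hx1 : 1 ≤ x := hb x hxX
        by_cases h1 : x + pySum p < N
        · have h2 : x < N - pySum p := by omega
          simp only [h1, decide_true, h2, if_pos]
          rw [pySum_append]
          have hstab : helperB X ((N - (pySum p + x)).toNat + 1) (N - (pySum p + x))
              = helperB X (N - pySum p).toNat (N - (pySum p + x)) := by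
            apply helperB_stab X hb
            · omega
            · omega
          have harg : N - pySum p - x = N - (pySum p + x) := by ring
          rw [harg, hstab, List.map_map]
          apply List.map_congr_left
          intro t ht
          simp
        · have h2 : ¬ (x < N - pySum p) := by omega
          simp [h1, h2]

-- the degenerate branch of Pre_: every step is ≥ N, so the loop stops after one pop
theorem branch2_eq (N : Int) (X : List Int) (ha : ∀ x ∈ X, N ≤ x) :
    path_Staircase_me N X = path_Staircase_me_alt N X := by
  unfold path_Staircase_me path_Staircase_me_alt
  obtain ⟨f, hf⟩ : ∃ f, (X.length + 1) ^ (N.toNat + 1) = f + 1 := by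
    have := pow_pos (show 0 < X.length + 1 by omega) (N.toNat + 1)
    exact ⟨(X.length + 1) ^ (N.toNat + 1) - 1, by omega⟩
  rw [hf]
  simp only [aLoop]
  rw [foldA_spec N [0] X [] []]
  have hps : pySum [0] = 0 := by simp [pySum]
  have hfil : X.filter (fun x => decide (x + pySum [0] < N)) = [] := by
    apply List.filter_eq_nil_iff.mpr
    intro x hx
    have := ha x hx
    rw [hps]
    simp; omega
  rw [hfil]
  simp only [List.map_nil, List.reverse_nil, List.nil_append, List.append_nil]
  show (X.flatMap fun x => if x + pySum [0] = N then [[0] ++ [x]] else []) ++ aLoop N X f [] = _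
  conv_rhs => rw [helperB]
  have hpart2 : (X.reverse.flatMap fun x =>
      if x < N then (helperB X N.toNat (N - x)).map (fun rest => x :: rest) else []) = [] := by
    apply List.flatMap_eq_nil_iff.mpr
    intro x hx
    have hxN := ha x (List.mem_reverse.mp hx)
    have : ¬ (x < N) := by omega
    simp [this]
  rw [hpart2]
  simp only [List.append_nil, List.map_flatMap]
  have : aLoop N X f [] = [] := by cases f <;> rfl
  rw [this, List.append_nil]
  apply List.flatMap_congr
  intro x hx
  rw [hps]
  by_cases h1 : x + 0 = N
  · have h2 : x = N := by omega
    simp [h2]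
  · have h2 : ¬ (x = N) := by omega
    simp [h2]

-- ===== VERDICT (by name: the statement is the Claim_ definition above) =====
theorem path_Staircase_me_spec : Claim_equal_path_Staircase_me := by
  intro N X _ hpre
  unfold Spec_path_Staircase_me
  rcases hpre with hb | ha
  · unfold path_Staircase_me path_Staircase_me_alt
    have hphi0 : phi N X [[0]] ≤ (X.length + 1) ^ (N.toNat + 1) := by
      have h1 : phi N X [[0]] = (X.length + 1) ^ N.toNat := by
        simp [phi, pySum]
      rw [h1]
      exact Nat.pow_le_pow_right (by omega) (by omega)
    rw [aLoop_eq N X hb _ [[0]] hphi0]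
    simp [pySum]
  · exact branch2_eq N X ha
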